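-- pv_equiv track=rewrite | github.com/morauszkia/advent-of-code-2025 | D6/main.py | accumulate_by_column
-- ===== SOURCE A (Python) =====
-- def accumulate_by_column(columns):
--     operator = ""
--     total = 0
--     current_result = 0
--     for column in columns:
--         if column[-1] != " ":
--             # operator stays the same until new operator found
--             operator = column[-1]
--             # new operator means new group of numbers
--             # current result needs to be reset
--             total += current_result
--             if operator == "+":
--                 current_result = 0
--             elif operator == "*":
--                 current_result = 1
--
--         # construct number string
--         number_string = "".join(column[0:-1]).strip()
--
--         # if column empty, ignore
--         if number_string == "":
--             continue
--
--         # sum or multiply based on operator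
--         if operator == "+":
--             current_result += int(number_string)
--         elif operator == "*":
--             current_result *= int(number_string)
--
--     total += current_result
--     return total
-- ===== SOURCE B (Python) =====
-- def _seg_value(op, nums, prev):
--     # value of one segment; an operator other than '+'/'*' keeps the previous result
--     if op == "+":
--         result = 0
--         for n in nums:
--             result += int(n)
--         return result
--     elif op == "*":
--         result = 1
--         for n in nums:
--             result *= int(n)
--         return result
--     return prev
--
--
-- def accumulate_by_column(columns):
--     # pass 1: split the columns into operator segments (leading segment has operator "")
--     segments = []
--     op = ""
--     nums = []
--     for column in columns:
--         if column[-1] != " ":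
--             segments.append((op, nums))
--             op = column[-1]
--             nums = []
--         number_string = "".join(column[0:-1]).strip()
--         if number_string != "":
--             nums.append(number_string)
--     segments.append((op, nums))
--     # pass 2: fold the segments, summing each boundary's running result
--     total = 0
--     result = 0
--     for op, nums in segments:
--         total += result
--         result = _seg_value(op, nums, result)
--     return total + result
-- ===== Notes on version B (the rewrite author's own statement) =====
-- stated objective: alternative
-- what changed: B replaces A's single streaming loop with interleaved operator/total/current state by a two-pass segmentation: pass one splits the columns into operator segments collecting each segment's trimmed number strings, pass two folds every segment's value (sum for '+', product for '*', previous result kept for any other operator) while summing the running result at each segment boundary.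
import Mathlib
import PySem

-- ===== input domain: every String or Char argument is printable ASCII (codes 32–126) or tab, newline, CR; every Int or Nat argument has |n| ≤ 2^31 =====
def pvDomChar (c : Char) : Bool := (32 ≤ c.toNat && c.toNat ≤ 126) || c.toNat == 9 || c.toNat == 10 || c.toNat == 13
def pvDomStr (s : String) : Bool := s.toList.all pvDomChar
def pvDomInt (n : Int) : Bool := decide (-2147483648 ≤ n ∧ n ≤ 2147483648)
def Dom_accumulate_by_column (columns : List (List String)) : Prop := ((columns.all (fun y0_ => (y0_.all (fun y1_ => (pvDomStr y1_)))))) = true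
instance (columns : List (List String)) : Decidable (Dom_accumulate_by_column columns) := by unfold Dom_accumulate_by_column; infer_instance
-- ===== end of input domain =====

-- B recomputes A's result by a two-pass segmentation (split into operator segments, then fold
-- segment values) instead of A's single streaming loop; same behaviour, alternative decomposition.

-- int(s); ofStr? = none is Python's ValueError, excluded by Pre_ (both Pythons call int on the same strings)
def intOf (s : String) : Int := (PySem.Int.ofStr? s).getD 0

-- ===== PORT A =====
-- loop body of A; state = (operator, total, current_result)
def stepA (st : String × Int × Int) (column : List String) : String × Int × Int :=
  -- column[-1]; pyGet? = none is Python's IndexError on an empty column, excluded by Pre_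
  let last := (PySem.List.pyGet? column (-1)).getD ""
  let (operator, total, current) :=
    if last ≠ " " then
      (last, st.2.1 + st.2.2,
        if last = "+" then (0 : Int) else if last = "*" then (1 : Int) else st.2.2)
    else st
  let number_string := PySem.Str.strip (PySem.Str.join "" (PySem.List.slice column (some 0) (some (-1))))
  if number_string = "" then (operator, total, current)
  else if operator = "+" then (operator, total, current + intOf number_string)
  else if operator = "*" then (operator, total, current * intOf number_string)
  else (operator, total, current)

def accumulate_by_column (columns : List (List String)) : Int :=
  let st := columns.foldl stepA ("", 0, 0)
  st.2.1 + st.2.2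

-- ===== PORT B =====
-- _seg_value(op, nums, prev)
def segValue (op : String) (nums : List String) (prev : Int) : Int :=
  if op = "+" then nums.foldl (fun r n => r + intOf n) 0
  else if op = "*" then nums.foldl (fun r n => r * intOf n) 1
  else prev

-- pass-1 loop body; state = (segments, op, nums)
def stepB (st : List (String × List String) × String × List String) (column : List String) :
    List (String × List String) × String × List String :=
  let last := (PySem.List.pyGet? column (-1)).getD ""
  let (segments, op, nums) :=
    if last ≠ " " then (st.1 ++ [(st.2.1, st.2.2)], last, ([] : List String)) else st
  let number_string := PySem.Str.strip (PySem.Str.join "" (PySem.List.slice column (some 0) (some (-1))))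
  if number_string = "" then (segments, op, nums) else (segments, op, nums ++ [number_string])

-- pass-2 loop body; state = (total, result)
def pass2f (acc : Int × Int) (seg : String × List String) : Int × Int :=
  (acc.1 + acc.2, segValue seg.1 seg.2 acc.2)

def accumulate_by_column_alt (columns : List (List String)) : Int :=
  let st := columns.foldl stepB ([], "", [])
  let p := (st.1 ++ [(st.2.1, st.2.2)]).foldl pass2f (0, 0)
  p.1 + p.2

-- ===== PRECONDITION & SPEC =====
-- helpers for Pre_ only: last string of a column and its trimmed joined number string
def pvLastStr (c : List String) : String := c.getLast?.getD ""
def pvNumStr (c : List String) : String := PySem.Str.strip (PySem.Str.join "" c.dropLast)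

-- Pre_ = exactly the inputs on which Python A returns: no empty column (IndexError), and every
-- nonempty number string whose nearest preceding operator column carries "+" or "*" parses as an int (ValueError).
def Pre_accumulate_by_column (columns : List (List String)) : Prop :=
  (∀ c ∈ columns, c ≠ []) ∧
  ∀ i ∈ List.range columns.length, ∀ j ∈ List.range (i + 1),
    pvLastStr (columns.getD j []) ∈ (["+", "*"] : List String) →
    (∀ k ∈ List.range (i + 1), j < k → pvLastStr (columns.getD k []) = " ") →
    (pvNumStr (columns.getD i []) = "" ∨ (PySem.Int.ofStr? (pvNumStr (columns.getD i []))).isSome = true)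

instance (columns : List (List String)) : Decidable (Pre_accumulate_by_column columns) := by
  unfold Pre_accumulate_by_column; infer_instance

def pvWitness_accumulate_by_column : List (List String) := [["1", "+"], ["2", " "]]

def Spec_accumulate_by_column (columns : List (List String)) (out : Int) : Prop := out = accumulate_by_column_alt columns
instance (columns : List (List String)) (out : Int) : Decidable (Spec_accumulate_by_column columns out) := by unfold Spec_accumulate_by_column; infer_instance

-- ===== CLAIM (what is proved, stated in full; the proofs are below) =====
def Claim_equal_accumulate_by_column : Prop := ∀ (columns : List (List String)), Dom_accumulate_by_column columns → Pre_accumulate_by_column columns → Spec_accumulate_by_column columns (accumulate_by_column columns)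

-- ===== LEMMAS AND PROOFS =====

theorem pvWitness_ok : Dom_accumulate_by_column pvWitness_accumulate_by_column ∧
    Pre_accumulate_by_column pvWitness_accumulate_by_column := by
  constructor
  · decide
  · unfold Pre_accumulate_by_column; decide

-- prepending segments commutes with pass 1
theorem stepB_shift (st : List (String × List String) × String × List String) (c : List String) :
    stepB st c = ((st.1 ++ (stepB ([], st.2.1, st.2.2) c).1,
      (stepB ([], st.2.1, st.2.2) c).2.1, (stepB ([], st.2.1, st.2.2) c).2.2)) := by
  obtain ⟨s, o, n⟩ := st
  simp only [stepB]
  split_ifs <;> simp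

theorem foldB_shift (cols : List (List String)) :
    ∀ (s : List (String × List String)) (o : String) (n : List String),
    cols.foldl stepB (s, o, n) =
      ((s ++ (cols.foldl stepB ([], o, n)).1,
        (cols.foldl stepB ([], o, n)).2.1, (cols.foldl stepB ([], o, n)).2.2)) := by
  induction cols with
  | nil => intro s o n; simp
  | cons c cols ih =>
    intro s o n
    simp only [List.foldl_cons]
    rw [stepB_shift (s, o, n) c, ih, stepB_shift ([], o, n) c]
    simp [ih ((stepB ([], o, n) c).1) _ _]

theorem segValue_other (op : String) (nums : List String) (r : Int)
    (h1 : ¬ op = "+") (h2 : ¬ op = "*") : segValue op nums r = r := by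
  simp [segValue, h1, h2]

-- appending one number to a segment's list updates its value the way A's loop does
theorem segValue_append (op : String) (nums : List String) (m : String) (prev : Int) :
    segValue op (nums ++ [m]) prev =
      (if op = "+" then segValue op nums prev + intOf m
       else if op = "*" then segValue op nums prev * intOf m
       else prev) := by
  simp only [segValue]
  split_ifs <;> simp

set_option maxHeartbeats 1000000 in
-- the core invariant: A's streaming loop agrees with pass 1 + pass 2 from any aligned state
theorem main_inv (cols : List (List String)) :
    ∀ (op : String) (nums : List String) (t r : Int),
    (let a := cols.foldl stepA (op, t + r, segValue op nums r); a.2.1 + a.2.2)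
    = (let b := cols.foldl stepB ([], op, nums);
       let p := (b.1 ++ [(b.2.1, b.2.2)]).foldl pass2f (t, r);
       p.1 + p.2) := by
  induction cols with
  | nil =>
    intro op nums t r
    simp [pass2f]
  | cons c cols ih =>
    intro op nums t r
    simp only [List.foldl_cons]
    by_cases hL : ((PySem.List.pyGet? c (-1)).getD "") ≠ " "
    · -- operator column: a segment boundary
      by_cases hN : PySem.Str.strip (PySem.Str.join "" (PySem.List.slice c (some 0) (some (-1)))) = ""
      · have hA : stepA (op, t + r, segValue op nums r) c
            = (((PySem.List.pyGet? c (-1)).getD ""), (t + r) + segValue op nums r,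
               segValue ((PySem.List.pyGet? c (-1)).getD "") [] (segValue op nums r)) := by
          simp only [stepA, segValue, hN]
          split_ifs <;> simp_all
        have hB : stepB ([], op, nums) c
            = ([(op, nums)], ((PySem.List.pyGet? c (-1)).getD ""), ([] : List String)) := by
          simp only [stepB, hN]
          split_ifs <;> simp_all
        rw [hA, hB, ih, foldB_shift cols [(op, nums)]]
        simp [pass2f]
      · have hA : stepA (op, t + r, segValue op nums r) c
            = (((PySem.List.pyGet? c (-1)).getD ""), (t + r) + segValue op nums r,
               segValue ((PySem.List.pyGet? c (-1)).getD "")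
                 [PySem.Str.strip (PySem.Str.join "" (PySem.List.slice c (some 0) (some (-1))))]
                 (segValue op nums r)) := by
          simp only [stepA, segValue, hN]
          split_ifs <;> simp_all
        have hB : stepB ([], op, nums) c
            = ([(op, nums)], ((PySem.List.pyGet? c (-1)).getD ""),
               [PySem.Str.strip (PySem.Str.join "" (PySem.List.slice c (some 0) (some (-1))))]) := by
          simp only [stepB, hN]
          split_ifs <;> simp_all
        rw [hA, hB, ih, foldB_shift cols [(op, nums)]]
        simp [pass2f]
    · -- non-operator column: same segment continues
      rw [not_not] at hL
      by_cases hN : PySem.Str.strip (PySem.Str.join "" (PySem.List.slice c (some 0) (some (-1)))) = ""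
      · have hA : stepA (op, t + r, segValue op nums r) c = (op, t + r, segValue op nums r) := by
          simp only [stepA, hL, hN]
          split_ifs <;> simp_all
        have hB : stepB ([], op, nums) c = ([], op, nums) := by
          simp only [stepB, hL, hN]
          split_ifs <;> simp_all
        rw [hA, hB, ih]
      · have hA : stepA (op, t + r, segValue op nums r) c
            = (op, t + r, segValue op
                (nums ++ [PySem.Str.strip (PySem.Str.join "" (PySem.List.slice c (some 0) (some (-1))))]) r) := by
          rw [segValue_append]
          simp only [stepA, hL, hN]
          split_ifs <;> simp_all [segValue_other]
        have hB : stepB ([], op, nums) c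
            = ([], op, nums ++ [PySem.Str.strip (PySem.Str.join "" (PySem.List.slice c (some 0) (some (-1))))]) := by
          simp only [stepB, hL, hN]
          split_ifs <;> simp_all
        rw [hA, hB, ih]

-- ===== VERDICT (by name: the statement is the Claim_ definition above) =====
theorem accumulate_by_column_spec : Claim_equal_accumulate_by_column := by
  intro columns _ _
  unfold Spec_accumulate_by_column accumulate_by_column accumulate_by_column_alt
  have h := main_inv columns "" [] 0 0
  simpa [segValue] using h
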